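-- pv_equiv track=rewrite | github.com/AlphaError/AI-Practice | Koras Python & AI Practice/Other Projects/Challenges.py | countClump
-- ===== SOURCE A (Python) =====
-- def countClump(word):
--     counter = 0
--     x = 0
--     while(x < len(word)-1):
--         if(word[x] == word[x+1]):
--             counter += 1
--             if not (x == len(word)-2):
--                 while (word[x] == word[x + 1]):
--                     x += 1
--         x += 1
--     return counter
-- ===== SOURCE B (Python) =====
-- def _runs(s):
--     """Split s into its maximal runs of equal adjacent characters."""
--     runs = []
--     while s:
--         k = 1
--         while k < len(s) and s[k] == s[0]:
--             k += 1
--         runs.append(s[:k])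
--         s = s[k:]
--     return runs
--
--
-- def countClump(word):
--     return sum(1 for run in _runs(word) if len(run) >= 2)
-- ===== Notes on version B (the rewrite author's own statement) =====
-- stated objective: simpler
-- what changed: Replaces the index walk with its inner skip-loop and len-2 boundary guard by splitting the string into maximal runs and counting the runs of length >= 2.
import Mathlib
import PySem

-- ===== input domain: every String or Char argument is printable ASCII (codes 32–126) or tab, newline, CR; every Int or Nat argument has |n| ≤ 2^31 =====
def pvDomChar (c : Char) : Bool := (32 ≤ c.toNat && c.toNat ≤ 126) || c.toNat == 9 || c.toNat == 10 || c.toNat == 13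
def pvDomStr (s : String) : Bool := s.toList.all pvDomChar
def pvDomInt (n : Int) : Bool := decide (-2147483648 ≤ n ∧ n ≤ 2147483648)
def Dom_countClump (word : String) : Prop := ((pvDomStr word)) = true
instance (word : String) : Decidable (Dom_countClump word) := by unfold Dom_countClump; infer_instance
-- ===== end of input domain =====

-- B replaces A's index walk (inner skip-loop + len-2 boundary guard) by splitting the
-- string into maximal runs and counting the runs of length ≥ 2 (objective: simpler).

-- ===== PORT A =====
-- inner 'while (word[x] == word[x + 1]): x += 1'; where Python would raise
-- IndexError (x+1 out of range) the port stops — those inputs are outside Pre_.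
def innerA (cs : List Char) (x : Nat) : Nat :=
  if h : x + 1 < cs.length then
    if cs[x]'(by omega) = cs[x+1]'h then innerA cs (x+1) else x
  else x
termination_by cs.length - x

theorem innerA_ge (cs : List Char) (x : Nat) : x ≤ innerA cs x := by
  unfold innerA
  split
  · split
    · have := innerA_ge cs (x+1); omega
    · exact le_refl x
  · exact le_refl x
termination_by cs.length - x

def loopA (cs : List Char) (x counter : Nat) : Nat :=
  if h : x + 1 < cs.length then
    if cs[x]'(by omega) = cs[x+1]'h then
      let x' := if x = cs.length - 2 then x else innerA cs x
      loopA cs (x' + 1) (counter + 1)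
    else loopA cs (x + 1) counter
  else counter
termination_by cs.length - x
decreasing_by
  · have := innerA_ge cs x
    simp only [x'] at *
    split <;> omega
  · omega

def countClump (word : String) : Int := Int.ofNat (loopA word.toList 0 0)

-- ===== PORT B =====
-- the inner 'while k < len(s) and s[k] == s[0]' scan of Source B's _runs: splits off the
-- tail of the first run of c (s[1:k]) and the remainder (s[k:])
def firstRunB (c : Char) : List Char → List Char × List Char
  | [] => ([], [])
  | d :: t =>
    if d = c then
      let p := firstRunB c t
      (d :: p.1, p.2)
    else ([], d :: t)

theorem firstRunB_rest_len (c : Char) (l : List Char) :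
    (firstRunB c l).2.length ≤ l.length := by
  induction l with
  | nil => simp [firstRunB]
  | cons d t ih =>
    simp only [firstRunB]
    split
    · simpa using Nat.le_succ_of_le ih
    · simp

-- Source B's _runs: the outer 'while s' loop, recursion on the remainder
def runsB : List Char → List (List Char)
  | [] => []
  | c :: t =>
    let p := firstRunB c t
    (c :: p.1) :: runsB p.2
termination_by l => l.length
decreasing_by
  have := firstRunB_rest_len c t
  simp at *; omega

-- sum(1 for run in _runs(word) if len(run) >= 2)
def countClump_alt (word : String) : Int :=
  Int.ofNat ((runsB word.toList).countP (fun g => 2 ≤ g.length))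

-- ===== PRECONDITION & SPEC =====
-- Pre_ excludes exactly the strings ending in a run of ≥3 equal characters: there A's
-- inner skip-loop indexes one past the end and Python raises IndexError.
def Pre_countClump (word : String) : Prop :=
  word.toList.length < 3 ∨
    ¬ (word.toList[word.toList.length - 3]? = word.toList[word.toList.length - 2]? ∧
       word.toList[word.toList.length - 2]? = word.toList[word.toList.length - 1]?)
instance (word : String) : Decidable (Pre_countClump word) := by
  unfold Pre_countClump; infer_instance

def pvWitness_countClump : String := "aabbaa"

def Spec_countClump (word : String) (out : Int) : Prop := out = countClump_alt word
instance (word : String) (out : Int) : Decidable (Spec_countClump word out) := by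
  unfold Spec_countClump; infer_instance

-- ===== CLAIM (what is proved, stated in full; the proofs are below) =====
def Claim_equal_countClump : Prop :=
  ∀ (word : String), Dom_countClump word → Pre_countClump word →
    Spec_countClump word (countClump word)

-- ===== LEMMAS AND PROOFS =====

def countRunsB (l : List Char) : Nat := (runsB l).countP (fun g => 2 ≤ g.length)

theorem runsB_cons_ne (a b : Char) (t : List Char) (h : ¬ b = a) :
    runsB (a :: b :: t) = [a] :: runsB (b :: t) := by
  simp [runsB, firstRunB, h]

theorem firstRunB_decomp (c : Char) (l : List Char) :
    (firstRunB c l).1 ++ (firstRunB c l).2 = l := by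
  induction l with
  | nil => simp [firstRunB]
  | cons d t ih =>
    simp only [firstRunB]
    split
    · simpa using ih
    · simp

-- innerA skips exactly the tail of the first run: its stopping index + 1 is x+1 plus
-- the length of the run of c inside (drop (x+1) cs).
theorem innerA_firstRun (cs : List Char) (x : Nat) (c : Char)
    (hx : cs[x]? = some c) :
    innerA cs x = x + (firstRunB c (cs.drop (x+1))).1.length := by
  unfold innerA
  by_cases h : x + 1 < cs.length
  · have hd : cs.drop (x+1) = cs[x+1] :: cs.drop (x+2) :=
      List.drop_eq_getElem_cons h
    by_cases he : cs[x]'(by omega) = cs[x+1]'h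
    · have hxe : cs[x]'(by omega) = c := by
        have := hx; rw [List.getElem?_eq_getElem (by omega)] at this
        exact Option.some.inj this
      have hx1 : cs[x+1]? = some c := by
        rw [List.getElem?_eq_getElem h, ← he, hxe]
      have ih := innerA_firstRun cs (x+1) c hx1
      have e2 : x + 1 + 1 = x + 2 := by omega
      rw [e2] at ih
      simp only [h, he, dif_pos, if_pos]
      rw [ih, hd]
      have hce : cs[x+1] = c := by rw [← he, hxe]
      simp only [firstRunB, hce, if_pos rfl]
      simp
      omega
    · simp only [h, he, dif_pos, if_neg, if_false]
      rw [hd]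
      have : ¬ (cs[x+1] = c) := by
        intro hc
        apply he
        have : cs[x]'(by omega) = c := by
          have := hx; rw [List.getElem?_eq_getElem (by omega)] at this
          exact Option.some.inj this
        rw [this, hc]
      simp [firstRunB, this]
  · have : cs.drop (x+1) = [] := by
      apply List.drop_eq_nil_of_le; omega
    simp [h, this, firstRunB]
termination_by cs.length - x

theorem countRunsB_small (l : List Char) (h : l.length ≤ 1) : countRunsB l = 0 := by
  match l, h with
  | [], _ => simp [countRunsB, runsB]
  | [c], _ => simp [countRunsB, runsB, firstRunB, List.countP, List.countP.go]

-- main loop invariant: loopA computes counter + the number of runs of length ≥ 2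
-- in the suffix drop x cs
theorem loopA_eq (cs : List Char) (x counter : Nat) :
    loopA cs x counter = counter + countRunsB (cs.drop x) := by
  unfold loopA
  by_cases h : x + 1 < cs.length
  · have hd : cs.drop x = cs[x]'(by omega) :: cs.drop (x+1) :=
      List.drop_eq_getElem_cons (by omega)
    have hd1 : cs.drop (x+1) = cs[x+1]'h :: cs.drop (x+2) :=
      List.drop_eq_getElem_cons h
    by_cases he : cs[x]'(by omega) = cs[x+1]'h
    · simp only [h, he, dif_pos, if_pos]
      set c := cs[x]'(by omega) with hc
      -- the first run in drop x cs has length ≥ 2, and the remainder after it is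
      -- drop (innerA cs x + 1) cs
      have hfr : firstRunB c (cs.drop (x+1)) =
          (c :: (firstRunB c (cs.drop (x+2))).1, (firstRunB c (cs.drop (x+2))).2) := by
        rw [hd1, ← he]; simp [firstRunB]
      have hcount : countRunsB (cs.drop x) =
          1 + countRunsB (firstRunB c (cs.drop (x+1))).2 := by
        rw [hd]
        simp only [countRunsB, runsB, ← hc]
        rw [hfr]
        simp [List.countP_cons]
        omega
      have hinner : innerA cs x = x + (firstRunB c (cs.drop (x+1))).1.length := by
        apply innerA_firstRun
        rw [List.getElem?_eq_getElem (by omega)]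
      have hrest : ∀ j, j = x + (firstRunB c (cs.drop (x+1))).1.length →
          cs.drop (j + 1) = (firstRunB c (cs.drop (x+1))).2 := by
        intro j hj
        obtain ⟨r, s, hrs⟩ : ∃ r s, firstRunB c (cs.drop (x+1)) = (r, s) := ⟨_, _, rfl⟩
        have hdec : cs.drop (x+1) = r ++ s := by
          rw [← firstRunB_decomp c (cs.drop (x+1)), hrs]
        have hjr : j = x + r.length := by rw [hrs] at hj; exact hj
        have hstep : cs.drop (j+1) = (cs.drop (x+1)).drop r.length := by
          rw [List.drop_drop]; congr 1; omega
        rw [hrs, hstep, hdec]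
        exact List.drop_left
      split
      · -- x = cs.length - 2 : the loop stops right after; drop x cs = [c, c]
        rename_i hx2
        rw [loopA_eq cs (x+1) (counter+1)]
        have h1 : countRunsB (cs.drop (x+1)) = 0 :=
          countRunsB_small _ (by simp; omega)
        have h2 : countRunsB (cs.drop x) = 1 := by
          rw [hcount, hfr]
          have hdrop2 : cs.drop (x+2) = [] := by
            apply List.drop_eq_nil_of_le; omega
          rw [hdrop2]
          simp [firstRunB, countRunsB, runsB]
        rw [h1, h2]
      · rw [loopA_eq cs (innerA cs x + 1) (counter + 1),
            hrest (innerA cs x) hinner, hcount]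
        omega
    · simp only [h, he, dif_pos, if_neg, if_false]
      rw [loopA_eq cs (x+1) counter]
      have hne : ¬ (cs[x+1]'h = cs[x]'(by omega)) := fun hc => he hc.symm
      have heq : countRunsB (cs[x]'(by omega) :: cs[x+1]'h :: cs.drop (x+2)) =
          countRunsB (cs[x+1]'h :: cs.drop (x+2)) := by
        simp only [countRunsB, runsB_cons_ne _ _ _ hne, List.countP_cons]
        simp
      rw [hd, hd1, heq]
  · simp only [h, dif_neg, not_false_iff]
    have : countRunsB (cs.drop x) = 0 := by
      apply countRunsB_small
      simp; omega
    omega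
termination_by cs.length - x
decreasing_by
  · omega
  · have := innerA_ge cs x; omega
  · omega

-- ===== VERDICT (by name: the statement is the Claim_ definition above) =====
theorem countClump_spec : Claim_equal_countClump := by
  intro word _ _
  unfold Spec_countClump countClump countClump_alt
  rw [loopA_eq word.toList 0 0]
  simp [countRunsB]
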